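-- pv_equiv track=rewrite | github.com/MaxanceV/pfd-discovery | src/core/partition.py | refine_partitions
-- ===== SOURCE A (Python) =====
-- def refine_partitions(pi_x: list, pi_y: list) -> list:
--     """
--     Calcule pi_{X union Y} a partir de pi_X et pi_Y par intersection.
--     Slide 26 du cours.
--
--     Formule :
--       pi_{X union Y} = { C_X inter C_Y | C_X in pi_X, C_Y in pi_Y,
--                          |C_X inter C_Y| > 1 }
--
--     Pourquoi c'est efficace : on ne retouche JAMAIS le DataFrame
--     une fois les partitions de niveau 1 calculees.
--     """
--     result = []
--     for cx in pi_x: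
--         for cy in pi_y:
--             inter = cx & cy
--             if len(inter) > 1:
--                 result.append(inter)
--     return result
-- ===== SOURCE B (Python) =====
-- def refine_partitions(pi_x: list, pi_y: list) -> list:
--     # Inverted index: element -> list of indices of the pi_y cells containing it.
--     pos = {}
--     for j, cy in enumerate(pi_y):
--         for e in cy:
--             pos.setdefault(e, []).append(j)
--     result = []
--     for cx in pi_x:
--         # Group cx's elements by the pi_y cell(s) they fall in: one pass over cx,
--         # never touching pi_y cells that do not meet cx.
--         buckets = {}
--         for e in cx:
--             for j in pos.get(e, ()):
--                 buckets.setdefault(j, []).append(e)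
--         for j in sorted(buckets):
--             cell = buckets[j]
--             if len(cell) > 1:
--                 result.append(set(cell))
--     return result
-- ===== Notes on version B (the rewrite author's own statement) =====
-- stated objective: alternative
-- what changed: Replaces A's all-pairs scan (every pi_x cell intersected with every pi_y cell) by an inverted index element->pi_y-cell-index built once; each pi_x cell is then grouped by index in a single pass and groups of size >1 are emitted in index order.
import Mathlib
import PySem

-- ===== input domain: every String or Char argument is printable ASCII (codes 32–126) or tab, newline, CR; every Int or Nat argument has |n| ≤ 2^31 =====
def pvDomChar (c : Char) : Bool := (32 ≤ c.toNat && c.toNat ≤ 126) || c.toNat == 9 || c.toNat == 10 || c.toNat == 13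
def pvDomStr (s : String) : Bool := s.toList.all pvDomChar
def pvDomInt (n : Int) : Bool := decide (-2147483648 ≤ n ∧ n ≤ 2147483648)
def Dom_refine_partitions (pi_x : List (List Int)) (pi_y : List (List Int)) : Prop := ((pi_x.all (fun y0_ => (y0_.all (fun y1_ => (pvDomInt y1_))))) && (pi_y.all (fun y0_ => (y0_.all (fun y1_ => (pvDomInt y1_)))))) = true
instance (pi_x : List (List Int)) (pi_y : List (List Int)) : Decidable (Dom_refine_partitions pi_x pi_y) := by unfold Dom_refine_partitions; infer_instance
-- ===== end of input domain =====

-- B replaces A's all-pairs intersection scan by an inverted index pi_y-element → cell index,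
-- grouping each cx's elements by that index in one pass (a different algorithm, similar cost).

-- ===== PORT A =====
-- 'cx & cy' (set intersection) is ported as the elements of cx lying in cy, in cx's order;
-- cells are Python sets (compared as finite sets), so this order choice is exact.
def refine_partitions (pi_x : List (List Int)) (pi_y : List (List Int)) : List (List Int) :=
  pi_x.foldl (fun result cx =>
    pi_y.foldl (fun result cy =>
      let inter := cx.filter (fun e => cy.contains e)
      if 1 < inter.length then result ++ [inter] else result) result) []

-- ===== PORT B =====
def refine_partitions_alt (pi_x : List (List Int)) (pi_y : List (List Int)) : List (List Int) :=
  let pos : PySem.Dict Int (List Int) :=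
    (PySem.List.enumerate pi_y 0).foldl (fun d jc =>
      jc.2.foldl (fun d e => d.modify e [] (· ++ [jc.1])) d) PySem.Dict.empty
  pi_x.foldl (fun result cx =>
    let buckets : PySem.Dict Int (List Int) :=
      cx.foldl (fun b e =>
        (pos.getD e []).foldl (fun b j => b.modify j [] (· ++ [e])) b) PySem.Dict.empty
    (PySem.List.sorted buckets.keys (fun j => j) false).foldl (fun result j =>
      -- buckets[j]: j is drawn from buckets' keys, so the [] default is never used
      let cell := buckets.getD j []
      if 1 < cell.length then result ++ [cell] else result) result) []

-- ===== PRECONDITION & SPEC =====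
-- Pre_ states the set-representation invariant of the inputs: the cells of pi_y are Python
-- sets, so their List encodings hold distinct elements. It excludes no Python input of the
-- declared type list[set[int]] (duplicate-bearing cell lists do not arise from sets);
-- only pi_y's cells matter for the equality, so nothing is required of pi_x.
def Pre_refine_partitions (pi_x : List (List Int)) (pi_y : List (List Int)) : Prop :=
  ∀ cy ∈ pi_y, cy.Nodup
instance (pi_x : List (List Int)) (pi_y : List (List Int)) : Decidable (Pre_refine_partitions pi_x pi_y) := by unfold Pre_refine_partitions; infer_instance
def pvWitness_refine_partitions : List (List Int) × List (List Int) := ([[1, 2], [3]], [[1, 2, 3]])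
def Spec_refine_partitions (pi_x : List (List Int)) (pi_y : List (List Int)) (out : List (List Int)) : Prop := out = refine_partitions_alt pi_x pi_y
instance (pi_x : List (List Int)) (pi_y : List (List Int)) (out : List (List Int)) : Decidable (Spec_refine_partitions pi_x pi_y out) := by unfold Spec_refine_partitions; infer_instance

-- ===== CLAIM (what is proved, stated in full; the proofs are below) =====
def Claim_equal_refine_partitions : Prop := ∀ (pi_x : List (List Int)) (pi_y : List (List Int)), Dom_refine_partitions pi_x pi_y → Pre_refine_partitions pi_x pi_y → Spec_refine_partitions pi_x pi_y (refine_partitions pi_x pi_y)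

-- ===== LEMMAS AND PROOFS =====

def pvPos (pi_y : List (List Int)) : PySem.Dict Int (List Int) :=
  (PySem.List.enumerate pi_y 0).foldl (fun d jc =>
    jc.2.foldl (fun d e => d.modify e [] (· ++ [jc.1])) d) PySem.Dict.empty

def pvInter (cx cy : List Int) : List Int := cx.filter (fun e => cy.contains e)


theorem filter_beq_of_nodup (l : List Int) (h : l.Nodup) (a : Int) :
    l.filter (fun x => x == a) = if l.contains a then [a] else [] := by
  induction l with
  | nil => simp
  | cons b t ih =>
    simp only [List.nodup_cons] at h
    by_cases hb : b = a
    · subst hb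
      have : t.filter (fun x => x == b) = [] := List.filter_eq_nil_iff.mpr (by
        intro x hx; simp; rintro rfl; exact h.1 hx)
      simp [this]
    · simp [hb, ih h.2, Ne.symm hb]

theorem flatMap_ite_singleton {α β : Type} (l : List α) (p : α → Bool) (f : α → β) :
    (l.flatMap fun x => if p x then [f x] else []) = (l.filter p).map f := by
  induction l with
  | nil => simp
  | cons a t ih => by_cases h : p a <;> simp [h, ih]

theorem pos_getD (pi_y : List (List Int)) (hy : ∀ cy ∈ pi_y, cy.Nodup) (e : Int) :
    (pvPos pi_y).getD e []
      = ((PySem.List.enumerate pi_y 0).filter (fun jc => jc.2.contains e)).map (·.1) := by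
  have h1 : pvPos pi_y
      = ((PySem.List.enumerate pi_y 0).flatMap (fun jc => jc.2.map (fun x => (x, jc.1)))).foldl
          (fun d p => d.modify p.1 [] (· ++ [p.2])) PySem.Dict.empty := by
    rw [List.foldl_flatMap]
    simp only [List.foldl_map]
    rfl
  rw [h1, PySem.Dict.getD_foldl_modify_append]
  simp only [PySem.Dict.getD_empty, List.nil_append, List.filter_flatMap, List.filter_map,
    List.map_flatMap]
  have h2 : ∀ jc ∈ PySem.List.enumerate pi_y 0,
      ((jc.2.filter (fun x => (x, jc.1).1 == e)).map (fun x => (x, jc.1))).map (·.2)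
        = if jc.2.contains e then [jc.1] else [] := by
    intro jc hjc
    have hnd : jc.2.Nodup := by
      rw [PySem.List.mem_enumerate_iff] at hjc
      obtain ⟨k, hk, rfl⟩ := hjc
      exact hy _ (pi_y.getElem_mem hk)
    simp only [List.map_map]
    have : jc.2.filter (fun x => (x, jc.1).1 == e) = jc.2.filter (fun x => x == e) := rfl
    rw [this, filter_beq_of_nodup _ hnd]
    by_cases h : e ∈ jc.2 <;> simp [h]
  calc ((PySem.List.enumerate pi_y 0).flatMap
          fun jc => ((jc.2.filter (fun x => (x, jc.1).1 == e)).map (fun x => (x, jc.1))).map (·.2))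
      = (PySem.List.enumerate pi_y 0).flatMap (fun jc => if jc.2.contains e then [jc.1] else []) := by
        exact List.flatMap_congr h2
    _ = ((PySem.List.enumerate pi_y 0).filter (fun jc => jc.2.contains e)).map (·.1) := by
        rw [flatMap_ite_singleton]

theorem enumerate_fst_inj {α : Type} (xs : List α) (s : Int) (p q : Int × α)
    (hp : p ∈ PySem.List.enumerate xs s) (hq : q ∈ PySem.List.enumerate xs s)
    (h : p.1 = q.1) : p = q := by
  rw [PySem.List.mem_enumerate_iff] at hp hq
  obtain ⟨k, hk, rfl⟩ := hp
  obtain ⟨k', hk', rfl⟩ := hq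
  simp only at h
  have : k = k' := by omega
  subst this; rfl

theorem pos_getD_pairwise (pi_y : List (List Int)) (hy : ∀ cy ∈ pi_y, cy.Nodup) (e : Int) :
    ((pvPos pi_y).getD e []).Pairwise (· < ·) := by
  rw [pos_getD pi_y hy e]
  have hpw : ((PySem.List.enumerate pi_y 0).filter (fun jc => jc.2.contains e)).Pairwise
      (fun p q => p.1 < q.1) := (PySem.List.pairwise_lt_enumerate pi_y 0).filter _
  exact List.Pairwise.map _ (fun a b h => h) hpw

theorem pos_getD_contains (pi_y : List (List Int)) (hy : ∀ cy ∈ pi_y, cy.Nodup) (e : Int)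
    (jc : Int × List Int) (hjc : jc ∈ PySem.List.enumerate pi_y 0) :
    ((pvPos pi_y).getD e []).contains jc.1 = jc.2.contains e := by
  rw [pos_getD pi_y hy e]
  by_cases h : e ∈ jc.2
  · simp only [h, List.contains_eq_mem]
    have : jc.1 ∈ (((PySem.List.enumerate pi_y 0).filter (fun jc => jc.2.contains e)).map (·.1)) := by
      simp only [List.mem_map, List.mem_filter]
      exact ⟨jc, ⟨hjc, by simpa using h⟩, rfl⟩
    simpa using this
  · simp only [List.contains_eq_mem, h, decide_false]
    rw [decide_eq_false_iff_not]
    simp only [List.mem_map, List.mem_filter]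
    rintro ⟨jc', ⟨hjc', hc⟩, hfst⟩
    have := enumerate_fst_inj pi_y 0 jc' jc hjc' hjc hfst
    subst this
    simp at hc
    exact h hc

theorem buckets_eq_flat (pi_y : List (List Int)) (cx : List Int) :
    (cx.foldl (fun b e =>
        (((pvPos pi_y)).getD e []).foldl (fun b j => b.modify j [] (· ++ [e])) b)
        (PySem.Dict.empty : PySem.Dict Int (List Int)))
      = (cx.flatMap (fun e => ((pvPos pi_y).getD e []).map (fun j => (j, e)))).foldl
          (fun b p => b.modify p.1 [] (· ++ [p.2])) PySem.Dict.empty := by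
  rw [List.foldl_flatMap]
  simp only [List.foldl_map]

theorem buckets_getD (pi_y : List (List Int)) (hy : ∀ cy ∈ pi_y, cy.Nodup) (cx : List Int)
    (j : Int) :
    ((cx.flatMap (fun e => ((pvPos pi_y).getD e []).map (fun j => (j, e)))).foldl
          (fun b p => b.modify p.1 [] (· ++ [p.2])) (PySem.Dict.empty : PySem.Dict Int (List Int))).getD j []
      = cx.filter (fun e => ((pvPos pi_y).getD e []).contains j) := by
  rw [PySem.Dict.getD_foldl_modify_append]
  simp only [PySem.Dict.getD_empty, List.nil_append, List.filter_flatMap, List.filter_map,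
    List.map_flatMap, Function.comp_def]
  have h2 : ∀ e ∈ cx,
      ((((pvPos pi_y).getD e []).filter (fun j' => j' == j)).map (fun j' => (j', e))).map (·.2)
        = if ((pvPos pi_y).getD e []).contains j then [e] else [] := by
    intro e _
    have hnd : ((pvPos pi_y).getD e []).Nodup :=
      (pos_getD_pairwise pi_y hy e).imp (fun h => ne_of_lt h)
    rw [filter_beq_of_nodup _ hnd]
    by_cases h : j ∈ (pvPos pi_y).getD e [] <;> simp [h]
  rw [List.flatMap_congr h2, flatMap_ite_singleton]
  simp

theorem sorted_buckets_keys (pi_y : List (List Int)) (hy : ∀ cy ∈ pi_y, cy.Nodup)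
    (cx : List Int) :
    PySem.List.sorted ((cx.flatMap (fun e => ((pvPos pi_y).getD e []).map (fun j => (j, e)))).foldl
          (fun b p => b.modify p.1 [] (· ++ [p.2])) (PySem.Dict.empty : PySem.Dict Int (List Int))).keys
        (fun j => j) false
      = ((PySem.List.enumerate pi_y 0).filter (fun jc => cx.any (fun e => jc.2.contains e))).map (·.1) := by
  have hkeys : ((cx.flatMap (fun e => ((pvPos pi_y).getD e []).map (fun j => (j, e)))).foldl
          (fun b p => b.modify p.1 [] (· ++ [p.2])) (PySem.Dict.empty : PySem.Dict Int (List Int))).keys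
      = PySem.Set.ofList ((cx.flatMap (fun e => ((pvPos pi_y).getD e []).map (fun j => (j, e)))).map (·.1)) := by
    rw [PySem.Dict.keys_foldl_modify_key]
    simp [PySem.Set.update_nil_left, PySem.Dict.keys_empty]
  rw [hkeys]
  have hpwE : ((PySem.List.enumerate pi_y 0).filter (fun jc => cx.any (fun e => jc.2.contains e))).Pairwise
      (fun p q => p.1 < q.1) := (PySem.List.pairwise_lt_enumerate pi_y 0).filter _
  have hpwJ : (((PySem.List.enumerate pi_y 0).filter (fun jc => cx.any (fun e => jc.2.contains e))).map (·.1)).Pairwise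
      (· < ·) := List.Pairwise.map _ (fun a b h => h) hpwE
  apply PySem.List.sorted_eq_of_perm_of_pairwise_lt
  · apply (List.perm_ext_iff_of_nodup (hpwJ.imp (fun h => ne_of_lt h)) (PySem.Set.nodup_ofList _)).mpr
    intro a
    rw [PySem.Set.mem_ofList]
    constructor
    · intro ha
      rcases List.mem_map.mp ha with ⟨jc, hjc, rfl⟩
      rcases List.mem_filter.mp hjc with ⟨hjcE, hhit⟩
      rcases List.any_eq_true.mp hhit with ⟨e, he, hce⟩
      have hj : jc.1 ∈ (pvPos pi_y).getD e [] := by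
        rw [pos_getD pi_y hy e]
        exact List.mem_map.mpr ⟨jc, List.mem_filter.mpr ⟨hjcE, hce⟩, rfl⟩
      exact List.mem_map.mpr ⟨(jc.1, e),
        List.mem_flatMap.mpr ⟨e, he, List.mem_map.mpr ⟨jc.1, hj, rfl⟩⟩, rfl⟩
    · intro ha
      rcases List.mem_map.mp ha with ⟨p, hp, rfl⟩
      rcases List.mem_flatMap.mp hp with ⟨e, he, hpe⟩
      rcases List.mem_map.mp hpe with ⟨j', hj', rfl⟩
      rw [pos_getD pi_y hy e] at hj'
      rcases List.mem_map.mp hj' with ⟨jc, hjc, rfl⟩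
      rcases List.mem_filter.mp hjc with ⟨hjcE, hcont⟩
      exact List.mem_map.mpr ⟨jc,
        List.mem_filter.mpr ⟨hjcE, List.any_eq_true.mpr ⟨e, he, hcont⟩⟩, rfl⟩
  · exact hpwJ

theorem per_cx (pi_y : List (List Int)) (hy : ∀ cy ∈ pi_y, cy.Nodup) (cx : List Int) :
    (let buckets : PySem.Dict Int (List Int) :=
      cx.foldl (fun b e =>
        (((pvPos pi_y)).getD e []).foldl (fun b j => b.modify j [] (· ++ [e])) b) PySem.Dict.empty
     ((PySem.List.sorted buckets.keys (fun j => j) false).filter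
        (fun j => decide (1 < (buckets.getD j []).length))).map (fun j => buckets.getD j []))
      = (pi_y.filter (fun cy => decide (1 < (pvInter cx cy).length))).map (pvInter cx) := by
  simp only [buckets_eq_flat]
  rw [sorted_buckets_keys pi_y hy cx]
  simp only [buckets_getD pi_y hy cx]
  -- characterise the bucket at a genuine index
  have hg : ∀ jc ∈ PySem.List.enumerate pi_y 0,
      cx.filter (fun e => ((pvPos pi_y).getD e []).contains jc.1) = pvInter cx jc.2 := by
    intro jc hjc
    unfold pvInter
    exact List.filter_congr (fun e _ => pos_getD_contains pi_y hy e jc hjc)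
  rw [List.filter_map, List.map_map]
  rw [List.filter_filter]
  have hpred : ∀ jc ∈ PySem.List.enumerate pi_y 0,
      (((fun j => decide (1 < (cx.filter (fun e => ((pvPos pi_y).getD e []).contains j)).length)) ∘ (·.1)) jc
        && (cx.any (fun e => jc.2.contains e)))
      = decide (1 < (pvInter cx jc.2).length) := by
    intro jc hjc
    simp only [Function.comp_apply]
    rw [show cx.filter (fun e => ((pvPos pi_y).getD e []).contains jc.1) = pvInter cx jc.2 from hg jc hjc]
    by_cases h : 1 < (pvInter cx jc.2).length
    · have hne : pvInter cx jc.2 ≠ [] := by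
        intro hnil; rw [hnil] at h; simp at h
      rcases List.exists_mem_of_ne_nil _ hne with ⟨e, he⟩
      unfold pvInter at he
      rcases List.mem_filter.mp he with ⟨hecx, hecy⟩
      simp only [h, decide_true, Bool.and_eq_true, List.any_eq_true]
      exact ⟨trivial, ⟨e, hecx, hecy⟩⟩
    · simp [h]
  rw [List.filter_congr hpred]
  rw [List.map_congr_left (fun jc hjc => by
    have hjcE : jc ∈ PySem.List.enumerate pi_y 0 := (List.mem_filter.mp hjc).1
    exact hg jc hjcE)]
  -- right-hand side through enumerate
  conv_rhs => rw [← PySem.List.map_snd_enumerate pi_y 0]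
  rw [List.filter_map, List.map_map]
  simp [Function.comp_def]

theorem hA_aux (pi_y : List (List Int)) (pi_x : List (List Int)) : ∀ acc : List (List Int),
    pi_x.foldl (fun result cx =>
      pi_y.foldl (fun result cy =>
        if 1 < (pvInter cx cy).length then result ++ [pvInter cx cy] else result) result) acc
    = acc ++ pi_x.flatMap (fun cx =>
        (pi_y.filter (fun cy => decide (1 < (pvInter cx cy).length))).map (pvInter cx)) := by
  induction pi_x with
  | nil => intro acc; simp
  | cons cx t ih =>
    intro acc
    rw [List.foldl_cons, ih, PySem.List.foldl_append_ite]
    simp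

theorem hA (pi_x pi_y : List (List Int)) :
    refine_partitions pi_x pi_y
      = pi_x.flatMap (fun cx =>
          (pi_y.filter (fun cy => decide (1 < (pvInter cx cy).length))).map (pvInter cx)) := by
  unfold refine_partitions
  show pi_x.foldl (fun result cx =>
      pi_y.foldl (fun result cy =>
        if 1 < (pvInter cx cy).length then result ++ [pvInter cx cy] else result) result) [] = _
  rw [hA_aux]
  simp

theorem hB_aux (pi_y : List (List Int)) (pi_x : List (List Int)) : ∀ acc : List (List Int),
    pi_x.foldl (fun result cx =>
      (PySem.List.sorted (cx.foldl (fun b e =>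
          (((pvPos pi_y)).getD e []).foldl (fun b j => b.modify j [] (· ++ [e])) b)
          (PySem.Dict.empty : PySem.Dict Int (List Int))).keys (fun j => j) false).foldl
        (fun result j =>
          if 1 < ((cx.foldl (fun b e =>
              (((pvPos pi_y)).getD e []).foldl (fun b j => b.modify j [] (· ++ [e])) b)
              (PySem.Dict.empty : PySem.Dict Int (List Int))).getD j []).length
          then result ++ [(cx.foldl (fun b e =>
              (((pvPos pi_y)).getD e []).foldl (fun b j => b.modify j [] (· ++ [e])) b)
              (PySem.Dict.empty : PySem.Dict Int (List Int))).getD j []]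
          else result) result) acc
    = acc ++ pi_x.flatMap (fun cx =>
        (let buckets : PySem.Dict Int (List Int) :=
          cx.foldl (fun b e =>
            (((pvPos pi_y)).getD e []).foldl (fun b j => b.modify j [] (· ++ [e])) b) PySem.Dict.empty
         ((PySem.List.sorted buckets.keys (fun j => j) false).filter
            (fun j => decide (1 < (buckets.getD j []).length))).map (fun j => buckets.getD j []))) := by
  induction pi_x with
  | nil => intro acc; simp
  | cons cx t ih =>
    intro acc
    rw [List.foldl_cons, ih, PySem.List.foldl_append_ite]
    simp

theorem hB (pi_x pi_y : List (List Int)) :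
    refine_partitions_alt pi_x pi_y
      = pi_x.flatMap (fun cx =>
          (let buckets : PySem.Dict Int (List Int) :=
            cx.foldl (fun b e =>
              (((pvPos pi_y)).getD e []).foldl (fun b j => b.modify j [] (· ++ [e])) b) PySem.Dict.empty
           ((PySem.List.sorted buckets.keys (fun j => j) false).filter
              (fun j => decide (1 < (buckets.getD j []).length))).map (fun j => buckets.getD j []))) := by
  show pi_x.foldl (fun result cx =>
      (PySem.List.sorted (cx.foldl (fun b e =>
          (((pvPos pi_y)).getD e []).foldl (fun b j => b.modify j [] (· ++ [e])) b)
          (PySem.Dict.empty : PySem.Dict Int (List Int))).keys (fun j => j) false).foldl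
        (fun result j =>
          if 1 < ((cx.foldl (fun b e =>
              (((pvPos pi_y)).getD e []).foldl (fun b j => b.modify j [] (· ++ [e])) b)
              (PySem.Dict.empty : PySem.Dict Int (List Int))).getD j []).length
          then result ++ [(cx.foldl (fun b e =>
              (((pvPos pi_y)).getD e []).foldl (fun b j => b.modify j [] (· ++ [e])) b)
              (PySem.Dict.empty : PySem.Dict Int (List Int))).getD j []]
          else result) result) [] = _
  rw [hB_aux]
  simp

theorem refine_partitions_main : ∀ (pi_x pi_y : List (List Int)),
    (∀ cy ∈ pi_y, cy.Nodup) →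
    refine_partitions pi_x pi_y = refine_partitions_alt pi_x pi_y := by
  intro pi_x pi_y hpre
  rw [hA, hB]
  apply List.flatMap_congr
  intro cx _
  exact (per_cx pi_y hpre cx).symm

-- ===== VERDICT (by name: the statement is the Claim_ definition above) =====
theorem refine_partitions_spec : Claim_equal_refine_partitions := by
  intro pi_x pi_y _ hpre
  exact refine_partitions_main pi_x pi_y hpre
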